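-- pv_equiv track=rewrite | github.com/dlwjdtn1112/MyCodingTestSpace | myspace_CodingTest/프로그래머스/Lv2/할인 행사.py | solution
-- ===== SOURCE A (Python) =====
-- def solution(want, number, discount):
--     arr = dict(zip(want, number))
--     cnt = 0
--     for i in range(len(discount) - 9):
--         result = []
--         cnt_l1 = []
--         for j in range(i, i + 10):
--             result.append(discount[j])
--         for k in want:
--             cnt_l1.append(result.count(k))
--         if cnt_l1 == number:
--             cnt += 1
--
--     if cnt == 0:
--         return 0
--     else:
--         return cnt
-- ===== SOURCE B (Python) =====
-- def solution(want, number, discount):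
--     # Sliding window: build the counts of the first 10 days once, then slide the
--     # window one day at a time, updating only the outgoing and incoming items.
--     win = {}
--     for d in discount[:10]:
--         win[d] = win.get(d, 0) + 1
--     total = 0
--     for i in range(len(discount) - 9):
--         if i:
--             out = discount[i - 1]
--             win[out] = win[out] - 1
--             new = discount[i + 9]
--             win[new] = win.get(new, 0) + 1
--         if [win.get(k, 0) for k in want] == number:
--             total += 1
--     return total
-- ===== Notes on version B (the rewrite author's own statement) =====
-- stated objective: faster
-- what changed: B replaces A's per-window rebuild (10 appends plus a result.count scan of the window for every want entry) with a sliding window: the frequency dict of the first 10 days is built once and then updated incrementally (one decrement, one increment) as the window slides, so each window costs O(|want|) dict lookups instead of O(10 + 10*|want|) list work.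
import Mathlib
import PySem

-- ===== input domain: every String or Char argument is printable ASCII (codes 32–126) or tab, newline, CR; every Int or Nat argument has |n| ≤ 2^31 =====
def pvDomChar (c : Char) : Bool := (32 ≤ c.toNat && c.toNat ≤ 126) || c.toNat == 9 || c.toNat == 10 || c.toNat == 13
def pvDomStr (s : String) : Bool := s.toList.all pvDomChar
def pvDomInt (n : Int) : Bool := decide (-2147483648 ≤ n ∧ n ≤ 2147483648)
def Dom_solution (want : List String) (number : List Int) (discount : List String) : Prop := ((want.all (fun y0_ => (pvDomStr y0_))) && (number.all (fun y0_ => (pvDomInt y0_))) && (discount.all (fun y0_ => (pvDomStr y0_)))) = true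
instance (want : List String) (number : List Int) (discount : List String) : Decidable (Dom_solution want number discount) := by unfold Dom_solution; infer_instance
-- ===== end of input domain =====

-- B slides one frequency dict over discount (one decrement, one increment per step)
-- instead of A's rebuilding each 10-day window and scanning it per want entry. Objective: faster (constant factor).

-- ===== PORT A =====
def solution (want : List String) (number : List Int) (discount : List String) : Int :=
  let _arr : PySem.Dict String Int := PySem.Dict.ofList (want.zip number)
  let cnt : Int := (PySem.List.pyRange 0 ((discount.length : Int) - 9) 1).foldl
    (fun cnt i =>
      let result : List String := (PySem.List.pyRange i (i + 10) 1).foldl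
        (fun r j => r ++ [PySem.List.pyGetD discount j ""]) []
      let cnt_l1 : List Int := want.foldl (fun c k => c ++ [((result.count k : Nat) : Int)]) []
      if cnt_l1 = number then cnt + 1 else cnt) 0
  if cnt = 0 then 0 else cnt

-- ===== PORT B =====
-- win[out] - 1 (Python: win[out] -= 1) is ported via getD: exact, since every element that
-- leaves the window was inserted into win when it entered (keys are never removed).
def solution_alt (want : List String) (number : List Int) (discount : List String) : Int :=
  let win0 : PySem.Dict String Int :=
    (PySem.List.slice discount none (some 10)).foldl
      (fun w d => w.insert d (w.getD d 0 + 1)) PySem.Dict.empty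
  let st : PySem.Dict String Int × Int :=
    (PySem.List.pyRange 0 ((discount.length : Int) - 9) 1).foldl
      (fun st i =>
        let win : PySem.Dict String Int :=
          if i ≠ 0 then
            let out := PySem.List.pyGetD discount (i - 1) ""
            let w1 := st.1.insert out (st.1.getD out 0 - 1)
            let nw := PySem.List.pyGetD discount (i + 9) ""
            w1.insert nw (w1.getD nw 0 + 1)
          else st.1
        if want.map (fun k => win.getD k 0) = number then (win, st.2 + 1) else (win, st.2))
      (win0, 0)
  st.2

-- ===== PRECONDITION & SPEC =====
def Spec_solution (want : List String) (number : List Int) (discount : List String) (out : Int) : Prop := out = solution_alt want number discount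
instance (want : List String) (number : List Int) (discount : List String) (out : Int) : Decidable (Spec_solution want number discount out) := by unfold Spec_solution; infer_instance

-- ===== CLAIM (what is proved, stated in full; the proofs are below) =====
def Claim_equal_solution : Prop := ∀ (want : List String) (number : List Int) (discount : List String), Dom_solution want number discount → Spec_solution want number discount (solution want number discount)

-- ===== LEMMAS AND PROOFS =====

/-- The 10-day window starting at day `i`, as A reads it. -/
def pvWin (discount : List String) (i : Int) : List String :=
  (PySem.List.pyRange i (i + 10) 1).map (fun j => PySem.List.pyGetD discount j "")

theorem pvFoldCongr {α β : Type} (l : List α) (c : β) (f g : β → α → β)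
    (h : ∀ c x, f c x = g c x) : l.foldl f c = l.foldl g c := by
  have hfg : f = g := funext fun c => funext fun x => h c x
  rw [hfg]

theorem pvFoldApp {α β : Type} (l : List α) (f : α → β) (acc : List β) :
    l.foldl (fun r x => r ++ [f x]) acc = acc ++ l.map f := by
  induction l generalizing acc with
  | nil => simp
  | cons x l ih => simp [List.foldl_cons, ih]

theorem pvIfSelf (X : Int) : (if X = 0 then (0 : Int) else X) = X := by
  by_cases h : X = 0 <;> simp [h]

/-- A computes the fold counting windows whose per-want counts equal `number`. -/
theorem pvA_eq (want : List String) (number : List Int) (discount : List String) :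
    solution want number discount =
      (PySem.List.pyRange 0 ((discount.length : Int) - 9) 1).foldl
        (fun cnt i =>
          if want.map (fun k => (((pvWin discount i).count k : Nat) : Int)) = number
          then cnt + 1 else cnt) 0 := by
  simp only [solution]
  rw [pvIfSelf]
  apply pvFoldCongr
  intro c i
  simp only [pvFoldApp, List.nil_append, pvWin]
  rfl

/-- The window at a natural starting index, in getD form. -/
theorem pvWin_eq (discount : List String) (N : Nat) :
    pvWin discount (N : Int) = (List.range 10).map (fun k => discount.getD (N + k) "") := by
  unfold pvWin
  rw [PySem.List.pyRange_one]
  rw [List.map_map]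
  have h10 : ((N : Int) + 10 - N).toNat = 10 := by omega
  rw [h10]
  apply List.map_congr_left
  intro k _
  show PySem.List.pyGetD discount ((N : Int) + (k : Int)) "" = discount.getD (N + k) ""
  rw [show (N : Int) + (k : Int) = ((N + k : Nat) : Int) by push_cast; ring,
    PySem.List.pyGetD_natCast]

theorem pvWin_head (d : List String) (N : Nat) :
    (List.range 10).map (fun k => d.getD (N + k) "") =
      d.getD N "" :: (List.range 9).map (fun k => d.getD (N + 1 + k) "") := by
  rw [show (10 : Nat) = 9 + 1 from rfl, List.range_succ_eq_map, List.map_cons, List.map_map]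
  refine congrArg₂ _ (by simp) ?_
  apply List.map_congr_left
  intro k _
  show d.getD (N + (k + 1)) "" = d.getD (N + 1 + k) ""
  congr 1
  omega

theorem pvWin_last (d : List String) (N : Nat) :
    (List.range 10).map (fun k => d.getD (N + k) "") =
      (List.range 9).map (fun k => d.getD (N + k) "") ++ [d.getD (N + 9) ""] := by
  rw [show (10 : Nat) = 9 + 1 from rfl, List.range_succ, List.map_append]
  rfl

/-- Sliding the window by one changes the count of `k` by the outgoing/incoming indicators. -/
theorem pvCountStep (d : List String) (N : Nat) (k : String) :
    (((pvWin d ((N + 1 : Nat) : Int)).count k : Nat) : Int) =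
      (((pvWin d (N : Int)).count k : Nat) : Int)
        - (if k = d.getD N "" then 1 else 0) + (if k = d.getD (N + 10) "" then 1 else 0) := by
  rw [pvWin_eq, pvWin_eq, pvWin_head d N, pvWin_last d (N + 1)]
  have h1 : ∀ (a : String) (l : List String),
      ((a :: l).count k : Int) = (l.count k : Int) + (if k = a then 1 else 0) := by
    intro a l
    by_cases h : a = k
    · rw [h, List.count_cons_self, if_pos rfl]; push_cast; ring
    · rw [List.count_cons_of_ne h, if_neg (Ne.symm h)]; ring
  have h2 : ∀ (a : String) (l : List String),
      ((l ++ [a]).count k : Int) = (l.count k : Int) + (if k = a then 1 else 0) := by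
    intro a l
    rw [List.count_append]
    by_cases h : a = k
    · have hs : List.count k [a] = 1 := by rw [← h]; simp
      rw [hs, if_pos h.symm]; push_cast; ring
    · have hs : List.count k [a] = 0 := by
        rw [List.count_eq_zero]; simp [Ne.symm h]
      rw [hs, if_neg (Ne.symm h)]; push_cast; ring
  rw [h1, h2]
  have hmid : (List.range 9).map (fun j => d.getD (N + 1 + j) "") =
      (List.range 9).map (fun j => d.getD ((N + 1) + j) "") := rfl
  rw [hmid]
  have h10 : d.getD (N + 1 + 9) "" = d.getD (N + 10) "" := by congr 1
  rw [h10]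
  ring

/-- Pointwise effect of B's two-insert update on getD. -/
theorem pvUpd (w : PySem.Dict String Int) (out nw k : String) :
    (((w.insert out (w.getD out 0 - 1)).insert nw
        ((w.insert out (w.getD out 0 - 1)).getD nw 0 + 1)).getD k 0) =
      w.getD k 0 - (if k = out then 1 else 0) + (if k = nw then 1 else 0) := by
  simp only [PySem.Dict.getD_insert]
  split_ifs <;> simp_all

-- ===== VERDICT (by name: the statement is the Claim_ definition above) =====
theorem solution_spec : Claim_equal_solution := by
  intro want number discount _
  show solution want number discount = solution_alt want number discount
  rw [pvA_eq]
  simp only [solution_alt]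
  set n := discount.length with hn
  rw [PySem.List.pyRange_one 0 ((n : Int) - 9)]
  set S : Nat := ((n : Int) - 9 - 0).toNat with hS
  have hcast : (List.range S).map (fun k => (0 : Int) + (k : Nat)) =
      (List.range S).map (fun k => ((k : Nat) : Int)) := by
    apply List.map_congr_left; intro k _; ring
  rw [hcast]
  set stepA : Int → Int → Int := fun cnt i =>
    if want.map (fun k => (((pvWin discount i).count k : Nat) : Int)) = number
    then cnt + 1 else cnt with hstepA
  set stepB : (PySem.Dict String Int × Int) → Int → (PySem.Dict String Int × Int) := fun st i =>
    let win : PySem.Dict String Int :=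
      if i ≠ 0 then
        let out := PySem.List.pyGetD discount (i - 1) ""
        let w1 := st.1.insert out (st.1.getD out 0 - 1)
        let nw := PySem.List.pyGetD discount (i + 9) ""
        w1.insert nw (w1.getD nw 0 + 1)
      else st.1
    if want.map (fun k => win.getD k 0) = number then (win, st.2 + 1) else (win, st.2)
    with hstepB
  set win0 : PySem.Dict String Int :=
    (PySem.List.slice discount none (some 10)).foldl
      (fun w d => w.insert d (w.getD d 0 + 1)) PySem.Dict.empty with hwin0
  -- initial dict counts the first ten days
  have hwin0D : ∀ k, win0.getD k 0 = (((discount.take 10).count k : Nat) : Int) := by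
    intro k
    rw [hwin0, PySem.List.slice_to discount (by norm_num : (0:Int) ≤ 10),
      PySem.Dict.foldl_insert_getD_add_one_eq_counter, PySem.Dict.getD_counter]
    have ht : (Int.toNat 10) = 10 := rfl
    rw [ht]
  -- window 0 is the first ten days when they exist
  have hwin0win : 10 ≤ n → ∀ k,
      (((pvWin discount ((0 : Nat) : Int)).count k : Nat) : Int) =
        (((discount.take 10).count k : Nat) : Int) := by
    intro h10 k
    congr 2
    rw [pvWin_eq]
    apply List.ext_getElem
    · simp; omega
    · intro i hi hi'
      simp only [List.getElem_map, List.getElem_range, List.getElem_take]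
      rw [List.getD_eq_getElem discount "" (by simp at hi; omega)]
      congr 1
      omega
  -- main invariant: running totals agree, and from step 1 on the dict holds the
  -- counts of the window just processed
  have main : ∀ N, N ≤ S →
      (((List.range N).map (fun k => ((k : Nat) : Int))).foldl stepB (win0, 0)).2 =
        ((List.range N).map (fun k => ((k : Nat) : Int))).foldl stepA 0 ∧
      (1 ≤ N → ∀ k,
        (((List.range N).map (fun k => ((k : Nat) : Int))).foldl stepB (win0, 0)).1.getD k 0 =
          (((pvWin discount ((N - 1 : Nat) : Int)).count k : Nat) : Int)) := by
    intro N
    induction N with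
    | zero => intro _; exact ⟨rfl, by omega⟩
    | succ M ih =>
      intro hMS
      have h10 : 10 ≤ n := by omega
      obtain ⟨ih1, ih2⟩ := ih (by omega)
      rw [List.range_succ, List.map_append, List.foldl_append, List.foldl_append]
      simp only [List.map_cons, List.map_nil, List.foldl_cons, List.foldl_nil]
      set stB := ((List.range M).map (fun k => ((k : Nat) : Int))).foldl stepB (win0, 0) with hstB
      set stA := ((List.range M).map (fun k => ((k : Nat) : Int))).foldl stepA 0 with hstA
      set winM : PySem.Dict String Int :=
        if ((M : Nat) : Int) ≠ 0 then
          (stB.1.insert (PySem.List.pyGetD discount (((M : Nat) : Int) - 1) "")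
              (stB.1.getD (PySem.List.pyGetD discount (((M : Nat) : Int) - 1) "") 0 - 1)).insert
            (PySem.List.pyGetD discount (((M : Nat) : Int) + 9) "")
            ((stB.1.insert (PySem.List.pyGetD discount (((M : Nat) : Int) - 1) "")
                (stB.1.getD (PySem.List.pyGetD discount (((M : Nat) : Int) - 1) "") 0 - 1)).getD
              (PySem.List.pyGetD discount (((M : Nat) : Int) + 9) "") 0 + 1)
        else stB.1
        with hwinM
      have happB : stepB stB ((M : Nat) : Int) =
          (if want.map (fun k => winM.getD k 0) = number
           then (winM, stB.2 + 1) else (winM, stB.2)) := rfl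
      have happA : stepA stA ((M : Nat) : Int) =
          (if want.map (fun k => (((pvWin discount ((M : Nat) : Int)).count k : Nat) : Int)) = number
           then stA + 1 else stA) := rfl
      have hdict : ∀ k,
          winM.getD k 0 = (((pvWin discount ((M : Nat) : Int)).count k : Nat) : Int) := by
        intro k
        rw [hwinM]
        by_cases hM : M = 0
        · subst hM
          rw [if_neg (by simp)]
          have hstB0 : stB.1 = win0 := by rw [hstB]; simp
          rw [hstB0, hwin0D k]
          exact (hwin0win h10 k).symm
        · obtain ⟨P, rfl⟩ : ∃ P, M = P + 1 := ⟨M - 1, by omega⟩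
          have hne : ((P + 1 : Nat) : Int) ≠ 0 := by push_cast; omega
          rw [if_pos hne]
          have hout : PySem.List.pyGetD discount (((P + 1 : Nat) : Int) - 1) "" =
              discount.getD P "" := by
            rw [show ((P + 1 : Nat) : Int) - 1 = ((P : Nat) : Int) by push_cast; ring,
              PySem.List.pyGetD_natCast]
          have hnw : PySem.List.pyGetD discount (((P + 1 : Nat) : Int) + 9) "" =
              discount.getD (P + 10) "" := by
            rw [show ((P + 1 : Nat) : Int) + 9 = ((P + 10 : Nat) : Int) by push_cast; ring,
              PySem.List.pyGetD_natCast]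
          rw [hout, hnw, pvUpd]
          have hIH := ih2 (by omega) k
          rw [show (P + 1 : Nat) - 1 = P from rfl] at hIH
          rw [hIH, pvCountStep discount P k]
      have hcond : want.map (fun k => winM.getD k 0) =
          want.map (fun k => (((pvWin discount ((M : Nat) : Int)).count k : Nat) : Int)) :=
        List.map_congr_left (fun k _ => hdict k)
      constructor
      · rw [happB, happA, hcond]
        split_ifs <;> simp [ih1]
      · intro _ k
        rw [happB, show (M + 1 : Nat) - 1 = M from rfl]
        split_ifs <;> exact hdict k
  exact (main S le_rfl).1.symm
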